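-- pv_equiv track=rewrite | github.com/ssv-170379/codewars_learn_python | solution/kyu_5/dots_and_boxes_validator.py | dots_and_boxes
-- ===== SOURCE A (Python) =====
-- def dots_and_boxes(moves: tuple[tuple[int, int]], players=2) -> tuple[int]:
--     # describe all possible quads within the grid
--     dots_count = max(dot_index for edge in moves for dot_index in edge) + 1  # total dots in grid = maximum dot index + 1
--     grid_size = int(dots_count ** .5)  # height (and width) of the square grid
--     quads = []  # init list for describing every possible quad for a given grid
--     for row in range(grid_size - 1):  # dot index of rows (omit lowest)
--         for column in range(grid_size - 1):  # dot index of columns (omit rightest)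
--             corner = row * grid_size + column  # upper-left corners of each possible quad of the grid
--             quads.append([(corner, corner + 1), (corner + 1, corner + grid_size + 1), (corner + grid_size, corner + grid_size + 1), (corner, corner + grid_size)])  # describe quad edges: top, right, bottom, left - each is a pair of dot indexes
--
--     # init game state
--     scores = [0] * players  # score for each player: [0, 0] for 2 players etc
--     active_player = 0  # index of player who will make next move
--
--     for move in moves:  # game loop
--         edge = tuple(sorted(move))  # sort vertex indexes of edge to match edges of quad descriptions
--         score = 0  # score for current move
--         for quad in quads:  # iterate all quads
--             if edge in quad:  # if edge belongs to a certain quad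
--                 quad.remove(edge)  # remove edge from quad description
--                 if not quad:  # removed last edge = quad claimed by active player
--                     score += 1  # count score
--         scores[active_player] += score  # update score for active player
--         if not score:  # if no score earned during current move - set next player active
--             active_player = (active_player + 1) % players  # cyclically iterate players, e.g. for 3 players: 0 -> 1 -> 2 -> 0 -> 1 ...
--
--     return tuple(scores)  # return result
-- ===== SOURCE B (Python) =====
-- def dots_and_boxes(moves, players=2):
--     # index quads by edge once, then score each move in O(1) via per-quad remaining-edge counters
--     dots_count = max(dot_index for edge in moves for dot_index in edge) + 1
--     grid_size = int(dots_count ** .5)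
--     edge_quads = {}   # sorted edge -> list of quad ids that contain it
--     remaining = []    # remaining (unplayed) edge count per quad id
--     for row in range(grid_size - 1):
--         for column in range(grid_size - 1):
--             corner = row * grid_size + column
--             qid = len(remaining)
--             remaining.append(4)
--             for e in ((corner, corner + 1), (corner + 1, corner + grid_size + 1),
--                       (corner + grid_size, corner + grid_size + 1), (corner, corner + grid_size)):
--                 edge_quads.setdefault(e, []).append(qid)
--     scores = [0] * players
--     active_player = 0
--     played = set()
--     for a, b in moves:
--         edge = (a, b) if a <= b else (b, a)
--         score = 0
--         if edge not in played:
--             played.add(edge)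
--             for qid in edge_quads.get(edge, ()):
--                 remaining[qid] -= 1
--                 if remaining[qid] == 0:
--                     score += 1
--         scores[active_player] += score
--         if not score:
--             active_player = (active_player + 1) % players
--     return tuple(scores)
-- ===== Notes on version B (the rewrite author's own statement) =====
-- stated objective: faster
-- what changed: Instead of scanning every quad per move and mutating the quad edge-lists, B precomputes once an edge->quad-ids dictionary plus a remaining-edge counter per quad and a played-edge set, so each move is scored in O(1) by decrementing the (at most 2) counters of the quads adjacent to a first-time edge.
import Mathlib
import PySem

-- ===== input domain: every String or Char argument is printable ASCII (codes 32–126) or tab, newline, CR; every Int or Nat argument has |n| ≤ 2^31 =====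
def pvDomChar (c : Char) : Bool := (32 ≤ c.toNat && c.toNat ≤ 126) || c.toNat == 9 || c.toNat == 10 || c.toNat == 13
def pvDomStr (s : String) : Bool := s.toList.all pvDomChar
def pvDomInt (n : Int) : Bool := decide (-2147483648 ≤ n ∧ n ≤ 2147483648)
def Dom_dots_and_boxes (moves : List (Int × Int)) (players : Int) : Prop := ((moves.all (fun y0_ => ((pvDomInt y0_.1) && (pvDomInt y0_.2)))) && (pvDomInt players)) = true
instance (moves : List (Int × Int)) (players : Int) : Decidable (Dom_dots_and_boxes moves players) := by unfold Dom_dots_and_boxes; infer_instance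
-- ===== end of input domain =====

-- B replaces A's per-move scan over all quads by a one-time edge→quad-ids index with
-- per-quad remaining-edge counters and a played-edge set (O(M+G) instead of O(M·G) quad visits).

-- ===== PORT A =====
-- tuple(sorted(move)) on a pair
def pvSort2 (m : Int × Int) : Int × Int := if m.1 ≤ m.2 then m else (m.2, m.1)

-- the 4 edges (top, right, bottom, left) of the quad with upper-left corner c, grid width g
def pvQuad (c g : Int) : List (Int × Int) :=
  [(c, c + 1), (c + 1, c + g + 1), (c + g, c + g + 1), (c, c + g)]

-- dots_count = max(...) + 1; grid_size = int(dots_count ** .5).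
-- Int.ofNat (Nat.sqrt ·.toNat) equals int(dots_count ** .5) for 0 ≤ dots_count ≤ 2^32
-- (Dom bounds every index by 2^31; Pre_ gives 0 ≤ dots_count). max() of empty moves
-- (ValueError) and dots_count < 0 (complex ** → TypeError in int()) are excluded by Pre_.
-- floor integer square root (Nat.sqrt is well-founded recursion, which the kernel cannot
-- unfold; this fuel-structural version computes the same value: r = 2*isqrt(n/4), +1 if it fits)
def pvSqrtGo (fuel n : Nat) : Nat :=
  match fuel with
  | 0 => 0
  | f + 1 =>
    if n ≤ 1 then n
    else
      let r := 2 * pvSqrtGo f (n / 4)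
      if (r + 1) * (r + 1) ≤ n then r + 1 else r

def pvGrid (moves : List (Int × Int)) : Int :=
  let dots := (PySem.List.max? (moves.flatMap (fun m => [m.1, m.2])) id).getD 0 + 1
  Int.ofNat (pvSqrtGo dots.toNat dots.toNat)

-- nested 'for row / for column: quads.append([...])'
def pvQuads (g : Int) : List (List (Int × Int)) :=
  (PySem.List.pyRange 0 (g - 1) 1).foldl (fun quads row =>
    (PySem.List.pyRange 0 (g - 1) 1).foldl (fun quads column =>
      quads ++ [pvQuad (row * g + column) g]) quads) []

-- inner 'for quad in quads' loop of one move: (updated quads, score of this move)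
def pvAInner (quads : List (List (Int × Int))) (edge : Int × Int) :
    List (List (Int × Int)) × Int :=
  quads.foldl (fun acc quad =>
    if edge ∈ quad then
      let q := (PySem.List.remove? quad edge).getD quad  -- quad.remove(edge); never none here: edge ∈ quad
      (acc.1 ++ [q], if q.isEmpty then acc.2 + 1 else acc.2)
    else (acc.1 ++ [quad], acc.2)) ([], 0)

-- one iteration of the game loop; state = (quads, scores, active_player)
-- scores[active_player] += score (players < 1, an IndexError, is excluded by Pre_)
def pvAMove (players : Int) (st : List (List (Int × Int)) × List Int × Int)
    (move : Int × Int) : List (List (Int × Int)) × List Int × Int :=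
  let edge := pvSort2 move
  let r := pvAInner st.1 edge
  let scores := PySem.List.pySetD st.2.1 st.2.2 (PySem.List.pyGetD st.2.1 st.2.2 0 + r.2)
  let active := if r.2 = 0 then PySem.Int.mod (st.2.2 + 1) players else st.2.2
  (r.1, scores, active)

def dots_and_boxes (moves : List (Int × Int)) (players : Int) : List Int :=
  let quads := pvQuads (pvGrid moves)
  (moves.foldl (pvAMove players) (quads, List.replicate players.toNat 0, (0 : Int))).2.1

-- ===== PORT B =====
-- one-time index: edge → list of quad ids (setdefault(e, []).append(qid) keeps the key's
-- position and appends qid, i.e. d[e] = d.get(e, []) + [qid]); remaining edge count per quad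
def pvBBuild (g : Int) : PySem.Dict (Int × Int) (List Int) × List Int :=
  (PySem.List.pyRange 0 (g - 1) 1).foldl (fun acc row =>
    (PySem.List.pyRange 0 (g - 1) 1).foldl (fun acc column =>
      let c := row * g + column
      let qid : Int := acc.2.length
      ((pvQuad c g).foldl (fun d e => d.insert e (d.getD e [] ++ [qid])) acc.1,
       acc.2 ++ [4])) acc) (PySem.Dict.empty, [])

-- one iteration of B's game loop; state = (remaining, played, scores, active_player)
def pvBMove (eqd : PySem.Dict (Int × Int) (List Int)) (players : Int)
    (st : List Int × List (Int × Int) × List Int × Int) (move : Int × Int) :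
    List Int × List (Int × Int) × List Int × Int :=
  let e := pvSort2 move
  let upd : List Int × List (Int × Int) × Int :=
    if e ∈ st.2.1 then (st.1, st.2.1, 0)
    else
      let z := (eqd.getD e []).foldl (fun (acc : List Int × Int) qid =>
        (PySem.List.pySetD acc.1 qid (PySem.List.pyGetD acc.1 qid 0 - 1),
         if PySem.List.pyGetD (PySem.List.pySetD acc.1 qid (PySem.List.pyGetD acc.1 qid 0 - 1)) qid 0 = 0
         then acc.2 + 1 else acc.2)) (st.1, (0 : Int))
      (z.1, PySem.Set.add st.2.1 e, z.2)
  let scores := PySem.List.pySetD st.2.2.1 st.2.2.2 (PySem.List.pyGetD st.2.2.1 st.2.2.2 0 + upd.2.2)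
  let active := if upd.2.2 = 0 then PySem.Int.mod (st.2.2.2 + 1) players else st.2.2.2
  (upd.1, upd.2.1, scores, active)

def dots_and_boxes_alt (moves : List (Int × Int)) (players : Int) : List Int :=
  let b := pvBBuild (pvGrid moves)
  (moves.foldl (pvBMove b.1 players)
    (b.2, ([] : List (Int × Int)), List.replicate players.toNat 0, (0 : Int))).2.2.1

-- ===== PRECONDITION & SPEC =====
-- Pre_ excludes exactly the inputs on which Python A raises: moves with no index ≥ -1
-- (dots_count < 0, so dots_count ** .5 is complex and int() raises TypeError; this also
-- covers empty moves, where max() raises ValueError) and players < 1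
-- (scores[active_player] raises IndexError).
def Pre_dots_and_boxes (moves : List (Int × Int)) (players : Int) : Prop :=
  1 ≤ players ∧ ∃ m ∈ moves, -1 ≤ m.1 ∨ -1 ≤ m.2
instance (moves : List (Int × Int)) (players : Int) : Decidable (Pre_dots_and_boxes moves players) := by unfold Pre_dots_and_boxes; infer_instance

def pvWitness_dots_and_boxes : (List (Int × Int)) × Int := ([(0, 1), (1, 3), (2, 3), (0, 2)], 2)

def Spec_dots_and_boxes (moves : List (Int × Int)) (players : Int) (out : List Int) : Prop := out = dots_and_boxes_alt moves players
instance (moves : List (Int × Int)) (players : Int) (out : List Int) : Decidable (Spec_dots_and_boxes moves players out) := by unfold Spec_dots_and_boxes; infer_instance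

-- ===== CLAIM (what is proved, stated in full; the proofs are below) =====
def Claim_equal_dots_and_boxes : Prop := ∀ (moves : List (Int × Int)) (players : Int), Dom_dots_and_boxes moves players → Pre_dots_and_boxes moves players → Spec_dots_and_boxes moves players (dots_and_boxes moves players)

-- ===== LEMMAS AND PROOFS =====

-- A's quads list as a flatMap
lemma pvQuads_eq (g : Int) :
    pvQuads g = (PySem.List.pyRange 0 (g - 1) 1).flatMap (fun row =>
      (PySem.List.pyRange 0 (g - 1) 1).map (fun column => pvQuad (row * g + column) g)) := by
  simp only [pvQuads, PySem.List.foldl_append_singleton_eq_map,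
    PySem.List.foldl_append_eq_flatMap, List.nil_append]

-- every quad has 4 pairwise distinct edges (any quad exists only when g ≥ 2)
lemma pvQuads_nodup (g : Int) : ∀ q ∈ pvQuads g, q.Nodup := by
  intro q hq
  rw [pvQuads_eq] at hq
  simp only [List.mem_flatMap, List.mem_map, PySem.List.mem_pyRange_one] at hq
  obtain ⟨row, ⟨hr0, hr1⟩, col, ⟨hc0, hc1⟩, rfl⟩ := hq
  have hg : 2 ≤ g := by omega
  simp [pvQuad, List.nodup_cons, Prod.mk.injEq]
  omega

-- every quad has length 4
lemma pvQuads_len (g : Int) : ∀ q ∈ pvQuads g, q.length = 4 := by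
  intro q hq
  rw [pvQuads_eq] at hq
  simp only [List.mem_flatMap, List.mem_map] at hq
  obtain ⟨row, _, col, _, rfl⟩ := hq
  rfl

-- B's builder as a fold over A's quads list
def pvBStep (acc : PySem.Dict (Int × Int) (List Int) × List Int) (q : List (Int × Int)) :
    PySem.Dict (Int × Int) (List Int) × List Int :=
  (q.foldl (fun d e => d.insert e (d.getD e [] ++ [((acc.2.length : Nat) : Int)])) acc.1,
   acc.2 ++ [4])

lemma pvBBuild_eq (g : Int) :
    pvBBuild g = (pvQuads g).foldl pvBStep (PySem.Dict.empty, []) := by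
  rw [pvQuads_eq]
  simp only [List.foldl_flatMap, List.foldl_map]
  rfl

-- registering one quad in the dict appends qid to the bucket of each of its edges
lemma pvDictQuad (q : List (Int × Int)) (hq : q.Nodup)
    (d : PySem.Dict (Int × Int) (List Int)) (qid : Int) (e : Int × Int) :
    (q.foldl (fun d e' => d.insert e' (d.getD e' [] ++ [qid])) d).getD e []
      = d.getD e [] ++ (if e ∈ q then [qid] else []) := by
  induction q generalizing d with
  | nil => simp
  | cons a t ih =>
    have hat : a ∉ t := (List.nodup_cons.mp hq).1
    have ht : t.Nodup := (List.nodup_cons.mp hq).2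
    simp only [List.foldl_cons]
    rw [ih ht]
    by_cases hea : e = a
    · subst hea
      rw [PySem.Dict.getD_insert]
      simp [hat]
    · rw [PySem.Dict.getD_insert]
      simp [hea, List.mem_cons]

-- the build fold: remaining = all 4s, bucket of e = ids of the quads containing e, in order
lemma pvBFold_spec (qs : List (List (Int × Int))) :
    ∀ (d : PySem.Dict (Int × Int) (List Int)) (rem : List Int),
    (∀ q ∈ qs, q.Nodup) →
    (qs.foldl pvBStep (d, rem)).2 = rem ++ List.replicate qs.length 4 ∧
    ∀ e, (qs.foldl pvBStep (d, rem)).1.getD e []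
        = d.getD e [] ++ ((List.range qs.length).filter
            (fun i => decide (e ∈ qs.getD i []))).map (fun i => ((rem.length + i : Nat) : Int)) := by
  induction qs with
  | nil => intro d rem _; simp
  | cons q t ih =>
    intro d rem hn
    have hq : q.Nodup := hn q (by simp)
    have ht : ∀ q' ∈ t, q'.Nodup := fun q' h => hn q' (by simp [h])
    simp only [List.foldl_cons]
    have hstep : pvBStep (d, rem) q
        = (q.foldl (fun d e' => d.insert e' (d.getD e' [] ++ [((rem.length : Nat) : Int)])) d,
           rem ++ [4]) := rfl
    rw [hstep]
    obtain ⟨ih1, ih2⟩ := ih (q.foldl (fun d e' => d.insert e' (d.getD e' [] ++ [((rem.length : Nat) : Int)])) d) (rem ++ [4]) ht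
    refine ⟨?_, ?_⟩
    · rw [ih1]
      simp [List.replicate_succ, List.append_assoc]
    · intro e
      rw [ih2 e, pvDictQuad q hq d _ e]
      rw [List.append_assoc]
      congr 1
      rw [List.length_cons, List.range_succ_eq_map, List.filter_cons]
      simp only [List.getD_cons_zero]
      rw [List.filter_map]
      rw [show ((fun i => decide (e ∈ (q :: t).getD i [])) ∘ Nat.succ)
            = (fun i : Nat => decide (e ∈ t.getD i [])) from funext fun i => rfl]
      by_cases he : e ∈ q
      · rw [if_pos he, if_pos (show decide (e ∈ q) = true by simp [he]),
          List.map_cons, List.map_map, List.singleton_append]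
        refine List.cons_eq_cons.mpr ⟨by simp, ?_⟩
        apply List.map_congr_left
        intro a _
        simp only [Function.comp_apply, List.length_append, List.length_cons,
          List.length_nil]
        push_cast
        ring
      · rw [if_neg he, if_neg (show ¬ decide (e ∈ q) = true by simp [he]),
          List.map_map, List.nil_append]
        apply List.map_congr_left
        intro a _
        simp only [Function.comp_apply, List.length_append, List.length_cons,
          List.length_nil]
        push_cast
        ring

-- closed form of A's inner loop
lemma pvAInner_eq (quads : List (List (Int × Int))) (e : Int × Int) :
    pvAInner quads e =
      (quads.map (fun q => if e ∈ q then (PySem.List.remove? q e).getD q else q),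
       ((quads.countP (fun q => decide (e ∈ q) &&
          ((PySem.List.remove? q e).getD q).isEmpty) : Nat) : Int)) := by
  unfold pvAInner
  suffices h : ∀ (acc : List (List (Int × Int)) × Int),
      quads.foldl (fun acc quad =>
        if e ∈ quad then
          (acc.1 ++ [(PySem.List.remove? quad e).getD quad],
           if ((PySem.List.remove? quad e).getD quad).isEmpty then acc.2 + 1 else acc.2)
        else (acc.1 ++ [quad], acc.2)) acc
      = (acc.1 ++ quads.map (fun q => if e ∈ q then (PySem.List.remove? q e).getD q else q),
         acc.2 + ((quads.countP (fun q => decide (e ∈ q) &&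
            ((PySem.List.remove? q e).getD q).isEmpty) : Nat) : Int)) by
    simpa using h ([], 0)
  induction quads with
  | nil => intro acc; simp
  | cons q t ih =>
    intro acc
    simp only [List.foldl_cons, List.map_cons, List.countP_cons]
    by_cases hq : e ∈ q
    · rw [if_pos hq, ih]
      have hp : (decide (e ∈ q) && ((PySem.List.remove? q e).getD q).isEmpty)
          = ((PySem.List.remove? q e).getD q).isEmpty := by simp [hq]
      rw [hp]
      by_cases hemp : ((PySem.List.remove? q e).getD q).isEmpty = true
      · rw [if_pos hemp, if_pos hemp]
        refine Prod.ext ?_ ?_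
        · simp [hq, List.append_assoc]
        · simp only []
          push_cast
          ring
      · rw [if_neg hemp, if_neg hemp]
        refine Prod.ext ?_ ?_
        · simp [hq, List.append_assoc]
        · simp
    · rw [if_neg hq, ih]
      have hp : (decide (e ∈ q) && ((PySem.List.remove? q e).getD q).isEmpty) = false := by
        simp [hq]
      rw [hp]
      refine Prod.ext ?_ ?_
      · simp [hq, List.append_assoc]
      · simp

-- a list recovered from getD over its index range
lemma pvMap_range_getD {α : Type} (l : List α) (d : α) :
    (List.range l.length).map (fun i => l.getD i d) = l := by
  induction l with
  | nil => simp
  | cons a t ih =>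
    rw [List.length_cons, List.range_succ_eq_map, List.map_cons, List.map_map]
    refine List.cons_eq_cons.mpr ⟨rfl, ?_⟩
    rw [show ((fun i => (a :: t).getD i d) ∘ Nat.succ) = (fun i => t.getD i d)
        from funext fun i => rfl]
    exact ih

lemma pvCountP_range {α : Type} (l : List α) (d : α) (p : α → Bool) :
    l.countP p = (List.range l.length).countP (fun i => p (l.getD i d)) := by
  conv_lhs => rw [← pvMap_range_getD l d]
  rw [List.countP_map]
  rfl

-- getD / getElem bridges
lemma pvGetD_int (l : List Int) (j : Nat) (h : j < l.length) : l.getD j 0 = l[j] := by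
  rw [List.getD_eq_getElem?_getD, List.getElem?_eq_getElem h]
  rfl

lemma pvGetD_map {β : Type} [Inhabited β] (qs : List (List (Int × Int)))
    (f : List (Int × Int) → β) (d0 : β) (i : Nat) (hi : i < qs.length) :
    (qs.map f).getD i d0 = f (qs.getD i []) := by
  rw [List.getD_eq_getElem?_getD, List.getElem?_map, List.getElem?_eq_getElem hi]
  simp [List.getD_eq_getElem?_getD, List.getElem?_eq_getElem hi]

-- B's inner counter loop, pointwise
lemma pvBInner_spec (idxs : List Nat) :
    ∀ (rem : List Int) (s0 : Int), idxs.Nodup → (∀ i ∈ idxs, i < rem.length) →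
    ((idxs.map (fun i : Nat => (i : Int))).foldl (fun (acc : List Int × Int) qid =>
        (PySem.List.pySetD acc.1 qid (PySem.List.pyGetD acc.1 qid 0 - 1),
         if PySem.List.pyGetD (PySem.List.pySetD acc.1 qid (PySem.List.pyGetD acc.1 qid 0 - 1)) qid 0 = 0
         then acc.2 + 1 else acc.2)) (rem, s0)).1.length = rem.length ∧
    (∀ j : Nat, ((idxs.map (fun i : Nat => (i : Int))).foldl (fun (acc : List Int × Int) qid =>
        (PySem.List.pySetD acc.1 qid (PySem.List.pyGetD acc.1 qid 0 - 1),
         if PySem.List.pyGetD (PySem.List.pySetD acc.1 qid (PySem.List.pyGetD acc.1 qid 0 - 1)) qid 0 = 0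
         then acc.2 + 1 else acc.2)) (rem, s0)).1.getD j 0
      = rem.getD j 0 - (if j ∈ idxs then 1 else 0)) ∧
    ((idxs.map (fun i : Nat => (i : Int))).foldl (fun (acc : List Int × Int) qid =>
        (PySem.List.pySetD acc.1 qid (PySem.List.pyGetD acc.1 qid 0 - 1),
         if PySem.List.pyGetD (PySem.List.pySetD acc.1 qid (PySem.List.pyGetD acc.1 qid 0 - 1)) qid 0 = 0
         then acc.2 + 1 else acc.2)) (rem, s0)).2
      = s0 + ((idxs.countP (fun i => rem.getD i 0 == 1) : Nat) : Int) := by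
  induction idxs with
  | nil =>
    intro rem s0 _ _
    refine ⟨rfl, fun j => by simp, by simp⟩
  | cons i t ih =>
    intro rem s0 hnd hb
    have hit : i ∉ t := (List.nodup_cons.mp hnd).1
    have hnt : t.Nodup := (List.nodup_cons.mp hnd).2
    have hi : i < rem.length := hb i (by simp)
    have hmc : (i :: t).map (fun i : Nat => (i : Int)) = (i : Int) :: t.map (fun i : Nat => (i : Int)) := rfl
    rw [hmc, List.foldl_cons]
    simp only [PySem.List.pySetD_natCast, PySem.List.pyGetD_natCast]
    have hget1 : (rem.set i (rem.getD i 0 - 1)).getD i 0 = rem.getD i 0 - 1 := by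
      simp [List.getD_eq_getElem?_getD, List.getElem?_set_self hi]
    rw [hget1]
    have hcond : ((rem.getD i 0 - 1 = 0) ↔ (rem.getD i 0 == 1) = true) := by
      simp [beq_iff_eq]
      omega
    have hb' : ∀ j ∈ t, j < (rem.set i (rem.getD i 0 - 1)).length := by
      intro j hj
      rw [List.length_set]
      exact hb j (by simp [hj])
    obtain ⟨L, G, S⟩ := ih (rem.set i (rem.getD i 0 - 1))
      (if rem.getD i 0 - 1 = 0 then s0 + 1 else s0) hnt hb'
    have hset_ne : ∀ j, j ≠ i → (rem.set i (rem.getD i 0 - 1)).getD j 0 = rem.getD j 0 := by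
      intro j hj
      simp [List.getD_eq_getElem?_getD, List.getElem?_set_ne (fun h => hj h.symm)]
    refine ⟨by rw [L, List.length_set], ?_, ?_⟩
    · intro j
      rw [G j]
      by_cases hji : j = i
      · subst hji
        rw [hget1]
        simp [hit]
      · rw [hset_ne j hji]
        simp [hji, List.mem_cons]
    · rw [S]
      have hcc : t.countP (fun i' => (rem.set i (rem.getD i 0 - 1)).getD i' 0 == 1)
          = t.countP (fun i' => rem.getD i' 0 == 1) := by
        apply List.countP_congr
        intro x hx
        rw [hset_ne x (fun h => hit (h ▸ hx))]
      rw [hcc, List.countP_cons]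
      by_cases hc : rem.getD i 0 - 1 = 0
      · rw [if_pos hc, if_pos (hcond.mp hc)]
        push_cast
        ring
      · rw [if_neg hc, if_neg (fun h => hc (hcond.mpr h))]
        simp

-- the two loop-state abstractions
def pvQuadsOf (g : Int) (played : List (Int × Int)) : List (List (Int × Int)) :=
  (pvQuads g).map (fun q => q.filter (fun x => decide (x ∉ played)))

def pvRemOf (g : Int) (played : List (Int × Int)) : List Int :=
  (pvQuadsOf g played).map (fun q => (q.length : Int))

def pvPlayedAfter (played : List (Int × Int)) (m : Int × Int) : List (Int × Int) :=
  if pvSort2 m ∈ played then played else played ++ [pvSort2 m]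

-- one move: both step functions advance to the same abstract state with the same score
lemma pvStep_eq (g players : Int) (played : List (Int × Int)) (scores : List Int)
    (active : Int) (m : Int × Int) :
    ∃ sc : Int,
      pvAMove players (pvQuadsOf g played, scores, active) m
        = (pvQuadsOf g (pvPlayedAfter played m),
           PySem.List.pySetD scores active (PySem.List.pyGetD scores active 0 + sc),
           if sc = 0 then PySem.Int.mod (active + 1) players else active) ∧
      pvBMove (pvBBuild g).1 players (pvRemOf g played, played, scores, active) m
        = (pvRemOf g (pvPlayedAfter played m), pvPlayedAfter played m,
           PySem.List.pySetD scores active (PySem.List.pyGetD scores active 0 + sc),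
           if sc = 0 then PySem.Int.mod (active + 1) players else active) := by
  by_cases hmem : pvSort2 m ∈ played
  · refine ⟨0, ?_, ?_⟩
    · have hno : ∀ q ∈ pvQuadsOf g played, pvSort2 m ∉ q := by
        intro q hq hin
        simp only [pvQuadsOf, List.mem_map] at hq
        obtain ⟨q0, _, rfl⟩ := hq
        have h2 := (List.mem_filter.mp hin).2
        simp only [decide_eq_true_eq] at h2
        exact h2 hmem
      have hmap : (pvQuadsOf g played).map
          (fun q => if pvSort2 m ∈ q then (PySem.List.remove? q (pvSort2 m)).getD q else q)
          = pvQuadsOf g played := by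
        rw [List.map_congr_left (fun q hq => if_neg (hno q hq))]
        exact List.map_id _
      have hcnt : (pvQuadsOf g played).countP
          (fun q => decide (pvSort2 m ∈ q) &&
            ((PySem.List.remove? q (pvSort2 m)).getD q).isEmpty) = 0 := by
        rw [List.countP_eq_zero]
        intro q hq
        simp [hno q hq]
      simp only [pvAMove, pvAInner_eq, hmap, hcnt, pvPlayedAfter, if_pos hmem]
      norm_num
    · simp only [pvBMove, pvPlayedAfter, if_pos hmem]
  · -- first play of this edge
    have hQlen : (pvQuadsOf g played).length = (pvQuads g).length := by
      simp [pvQuadsOf]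
    have hRlen : (pvRemOf g played).length = (pvQuads g).length := by
      simp [pvRemOf, pvQuadsOf]
    have hqids : (pvBBuild g).1.getD (pvSort2 m) []
        = ((List.range (pvQuads g).length).filter
            (fun i => decide (pvSort2 m ∈ (pvQuads g).getD i []))).map (fun i : Nat => (i : Int)) := by
      rw [pvBBuild_eq]
      rw [(pvBFold_spec (pvQuads g) PySem.Dict.empty [] (pvQuads_nodup g)).2 (pvSort2 m)]
      rw [PySem.Dict.getD_empty, List.nil_append]
      apply List.map_congr_left
      intro i _
      norm_num
    set e := pvSort2 m with he
    set qs := pvQuads g with hqs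
    set idxs := (List.range qs.length).filter (fun i => decide (e ∈ qs.getD i [])) with hidxs
    have hNodI : idxs.Nodup := List.Nodup.filter _ List.nodup_range
    have hbound : ∀ i ∈ idxs, i < (pvRemOf g played).length := by
      intro i hi
      rw [hRlen]
      exact List.mem_range.mp (List.mem_filter.mp hi).1
    obtain ⟨hL, hG, hS⟩ := pvBInner_spec idxs (pvRemOf g played) 0 hNodI hbound
    have hmemq : ∀ q : List (Int × Int),
        (e ∈ q.filter (fun x => decide (x ∉ played)) ↔ e ∈ q) := by
      intro q
      simp [List.mem_filter, hmem]
    have hfilt2 : ∀ q : List (Int × Int),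
        q.filter (fun x => decide (x ∉ played ++ [e]))
          = (q.filter (fun x => decide (x ∉ played))).filter (fun x => x != e) := by
      intro q
      rw [List.filter_filter]
      apply List.filter_congr
      intro x _
      by_cases hx1 : x = e <;> by_cases hx2 : x ∈ played <;>
        simp [hx1, hx2, List.mem_append]
    have hquads' : (pvQuadsOf g played).map
        (fun q => if e ∈ q then (PySem.List.remove? q e).getD q else q)
        = pvQuadsOf g (played ++ [e]) := by
      simp only [pvQuadsOf, List.map_map]
      apply List.map_congr_left
      intro q hq
      have hqn : q.Nodup := pvQuads_nodup g q hq
      have hfn : (q.filter (fun x => decide (x ∉ played))).Nodup := hqn.filter _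
      simp only [Function.comp_apply]
      rw [hfilt2 q]
      by_cases hq' : e ∈ q.filter (fun x => decide (x ∉ played))
      · rw [if_pos hq', PySem.List.remove?_eq_some_erase _ _ hq', Option.getD_some,
          List.Nodup.erase_eq_filter hfn e]
      · rw [if_neg hq']
        symm
        rw [List.filter_eq_self]
        intro x hx
        simp only [bne_iff_ne, ne_eq]
        intro hxe
        exact hq' (hxe ▸ hx)
    have hrem_at : ∀ i : Nat, i < qs.length →
        (pvRemOf g played).getD i 0
          = (((qs.getD i []).filter (fun x => decide (x ∉ played))).length : Int) := by
      intro i hi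
      have : pvRemOf g played
          = qs.map (fun q => ((q.filter (fun x => decide (x ∉ played))).length : Int)) := by
        simp [pvRemOf, pvQuadsOf, List.map_map]
        rfl
      rw [this, pvGetD_map qs _ 0 i hi]
    have hscore : (((pvQuadsOf g played).countP (fun q => decide (e ∈ q) &&
          ((PySem.List.remove? q e).getD q).isEmpty) : Nat) : Int)
        = ((idxs.countP (fun i => (pvRemOf g played).getD i 0 == 1) : Nat) : Int) := by
      have h1 : (pvQuadsOf g played).countP (fun q => decide (e ∈ q) &&
            ((PySem.List.remove? q e).getD q).isEmpty)
          = qs.countP (fun q => decide (e ∈ q.filter (fun x => decide (x ∉ played))) &&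
            ((PySem.List.remove? (q.filter (fun x => decide (x ∉ played))) e).getD
              (q.filter (fun x => decide (x ∉ played)))).isEmpty) := by
        rw [pvQuadsOf, List.countP_map]
        rfl
      rw [h1, pvCountP_range qs [] _, hidxs, List.countP_filter]
      norm_cast
      apply List.countP_congr
      intro i hi
      have hiN : i < qs.length := List.mem_range.mp hi
      rw [hrem_at i hiN]
      by_cases he1 : e ∈ qs.getD i []
      · have he2 : e ∈ (qs.getD i []).filter (fun x => decide (x ∉ played)) :=
          (hmemq (qs.getD i [])).mpr he1
        have hlenpos : 1 ≤ ((qs.getD i []).filter (fun x => decide (x ∉ played))).length :=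
          List.length_pos_of_mem he2
        rw [PySem.List.remove?_eq_some_erase _ _ he2, Option.getD_some]
        simp only [Bool.and_eq_true, decide_eq_true_eq, beq_iff_eq,
          List.isEmpty_iff_length_eq_zero, List.length_erase_of_mem he2]
        constructor
        · rintro ⟨-, h⟩
          exact ⟨by omega, he1⟩
        · rintro ⟨h, -⟩
          exact ⟨he2, by omega⟩
      · have he2 : e ∉ (qs.getD i []).filter (fun x => decide (x ∉ played)) :=
          fun h => he1 ((hmemq (qs.getD i [])).mp h)
        have hb1 : decide (e ∈ (qs.getD i []).filter (fun x => decide (x ∉ played))) = false := by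
          simpa using he2
        have hb2 : decide (e ∈ qs.getD i []) = false := by simpa using he1
        rw [hb1, hb2]
        simp
    refine ⟨((idxs.countP (fun i => (pvRemOf g played).getD i 0 == 1) : Nat) : Int), ?_, ?_⟩
    · -- A side
      simp only [pvAMove, pvAInner_eq, pvPlayedAfter, ← he, if_neg hmem]
      rw [hquads', hscore]
    · -- B side
      have hrem' : ((idxs.map (fun i : Nat => (i : Int))).foldl (fun (acc : List Int × Int) qid =>
            (PySem.List.pySetD acc.1 qid (PySem.List.pyGetD acc.1 qid 0 - 1),
             if PySem.List.pyGetD (PySem.List.pySetD acc.1 qid (PySem.List.pyGetD acc.1 qid 0 - 1)) qid 0 = 0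
             then acc.2 + 1 else acc.2)) (pvRemOf g played, (0 : Int))).1
          = pvRemOf g (played ++ [e]) := by
        have hlen2 : (pvRemOf g (played ++ [e])).length = qs.length := by
          rw [hqs]
          simp [pvRemOf, pvQuadsOf]
        have hrem2_at : ∀ i : Nat, i < qs.length →
            (pvRemOf g (played ++ [e])).getD i 0
              = (((qs.getD i []).filter (fun x => decide (x ∉ played ++ [e]))).length : Int) := by
          intro i hi
          have : pvRemOf g (played ++ [e])
              = qs.map (fun q => ((q.filter (fun x => decide (x ∉ played ++ [e]))).length : Int)) := by
            simp [pvRemOf, pvQuadsOf, List.map_map]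
            rfl
          rw [this, pvGetD_map qs _ 0 i hi]
        apply List.ext_getElem
        · rw [hL, hRlen, hlen2]
        · intro j hj1 hj2
          have hjN : j < qs.length := by
            rw [← hlen2]
            exact hj2
          rw [← pvGetD_int _ j hj1, ← pvGetD_int _ j hj2, hG j, hrem_at j hjN, hrem2_at j hjN,
            hfilt2 (qs.getD j [])]
          by_cases hje : e ∈ qs.getD j []
          · have hjidx : j ∈ idxs := by
              rw [hidxs]
              exact List.mem_filter.mpr ⟨List.mem_range.mpr hjN, by simpa using hje⟩
            have he2 : e ∈ (qs.getD j []).filter (fun x => decide (x ∉ played)) :=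
              (hmemq _).mpr hje
            have hfn : ((qs.getD j []).filter (fun x => decide (x ∉ played))).Nodup := by
              by_cases hjl : qs.getD j [] ∈ qs
              · exact (pvQuads_nodup g _ hjl).filter _
              · have : qs.getD j [] = qs[j] := by
                  rw [List.getD_eq_getElem?_getD, List.getElem?_eq_getElem hjN]; rfl
                exact absurd (this ▸ List.getElem_mem hjN) hjl
            rw [if_pos hjidx, ← List.Nodup.erase_eq_filter hfn e,
              List.length_erase_of_mem he2]
            have hlenpos : 1 ≤ ((qs.getD j []).filter (fun x => decide (x ∉ played))).length :=
              List.length_pos_of_mem he2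
            omega
          · have hjidx : j ∉ idxs := by
              rw [hidxs]
              intro hcon
              exact hje (by simpa using (List.mem_filter.mp hcon).2)
            have he2 : e ∉ (qs.getD j []).filter (fun x => decide (x ∉ played)) :=
              fun h => hje ((hmemq _).mp h)
            rw [if_neg hjidx]
            have : ((qs.getD j []).filter (fun x => decide (x ∉ played))).filter
                (fun x => x != e) = (qs.getD j []).filter (fun x => decide (x ∉ played)) := by
              rw [List.filter_eq_self]
              intro x hx
              simp only [bne_iff_ne, ne_eq]
              intro hxe
              exact he2 (hxe ▸ hx)
            rw [this]
            omega
      simp only [pvBMove, ← he, if_neg hmem, pvPlayedAfter]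
      rw [hqids, hrem', hS, PySem.Set.add_of_not_mem hmem]
      norm_num
  -- end
-- the main loop invariant
lemma pvLoop (g players : Int) (moves : List (Int × Int)) :
    ∀ (played : List (Int × Int)) (scores : List Int) (active : Int),
    (moves.foldl (pvAMove players) (pvQuadsOf g played, scores, active)).2.1
      = (moves.foldl (pvBMove (pvBBuild g).1 players)
          (pvRemOf g played, played, scores, active)).2.2.1 := by
  induction moves with
  | nil => intro played scores active; rfl
  | cons m t ih =>
    intro played scores active
    obtain ⟨sc, hA, hB⟩ := pvStep_eq g players played scores active m
    simp only [List.foldl_cons, hA, hB]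
    exact ih (pvPlayedAfter played m) _ _

-- ===== VERDICT (by name: the statement is the Claim_ definition above) =====
theorem dots_and_boxes_spec : Claim_equal_dots_and_boxes := by
  intro moves players _ _
  unfold Spec_dots_and_boxes
  have h0 : pvQuadsOf (pvGrid moves) [] = pvQuads (pvGrid moves) := by
    unfold pvQuadsOf
    simp
  have h1 : (pvBBuild (pvGrid moves)).2 = pvRemOf (pvGrid moves) [] := by
    rw [pvBBuild_eq]
    rw [(pvBFold_spec (pvQuads (pvGrid moves)) PySem.Dict.empty []
      (pvQuads_nodup (pvGrid moves))).1]
    unfold pvRemOf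
    rw [h0, List.nil_append]
    apply List.ext_getElem
    · simp
    · intro i hi1 hi2
      have hi : i < (pvQuads (pvGrid moves)).length := by simpa using hi2
      rw [List.getElem_replicate, List.getElem_map,
        pvQuads_len (pvGrid moves) _ (List.getElem_mem _)]
      rfl
  rw [show dots_and_boxes moves players
      = (moves.foldl (pvAMove players) (pvQuads (pvGrid moves),
          List.replicate players.toNat 0, (0 : Int))).2.1 from rfl,
    show dots_and_boxes_alt moves players
      = (moves.foldl (pvBMove (pvBBuild (pvGrid moves)).1 players)
          ((pvBBuild (pvGrid moves)).2, ([] : List (Int × Int)),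
           List.replicate players.toNat 0, (0 : Int))).2.2.1 from rfl]
  rw [h1, ← h0]
  exact pvLoop (pvGrid moves) players moves [] _ 0
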